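-- pv_equiv track=rewrite | github.com/lemikee/structy | 07_exhaustive_recursion/parenthetical_possibilites.py | parenthetical_possibilities
-- ===== SOURCE A (Python) =====
-- def parenthetical_possibilities(s):
--     if len(s) == 0:
--         return ['']
--
--     remainder, choices = get_options(s)
--     suffixes = parenthetical_possibilities(remainder)
--     possibilites = []
--
--     for suffix in suffixes:
--         possibilites += [choice + suffix for choice in choices]
--
--     return possibilites
--
-- def get_options(s):
--     if s[0] == '(':
--         end = s.index(')')
--         remainder = s[end + 1:]
--         choices = s[1:end]
--         return (remainder, choices)
--     else:
--         # return (s[0], s[1:])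
--         chars = s[0]
--         remaining = s[1:]
--         return (s[1:], s[0])
-- ===== SOURCE B (Python) =====
-- def parenthetical_possibilities(s):
--     # one-pass parse into option groups, then iterative product (leftmost group varies fastest)
--     groups = []
--     i = 0
--     n = len(s)
--     while i < n:
--         if s[i] == '(':
--             j = s.index(')', i)
--             groups.append(list(s[i + 1:j]))
--             i = j + 1
--         else:
--             groups.append([s[i]])
--             i += 1
--     results = ['']
--     for g in groups:
--         results = [p + c for c in g for p in results]
--     return results
-- ===== Notes on version B (the rewrite author's own statement) =====
-- stated objective: alternative
-- what changed: Replaced A's recursion on the remainder (re-splitting and combining at every call) by a single left-to-right parse into a list of option groups followed by an iterative left-fold product; Pre_ excludes strings containing a '(' with no later ')', on which both A and B raise ValueError.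
import Mathlib
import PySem

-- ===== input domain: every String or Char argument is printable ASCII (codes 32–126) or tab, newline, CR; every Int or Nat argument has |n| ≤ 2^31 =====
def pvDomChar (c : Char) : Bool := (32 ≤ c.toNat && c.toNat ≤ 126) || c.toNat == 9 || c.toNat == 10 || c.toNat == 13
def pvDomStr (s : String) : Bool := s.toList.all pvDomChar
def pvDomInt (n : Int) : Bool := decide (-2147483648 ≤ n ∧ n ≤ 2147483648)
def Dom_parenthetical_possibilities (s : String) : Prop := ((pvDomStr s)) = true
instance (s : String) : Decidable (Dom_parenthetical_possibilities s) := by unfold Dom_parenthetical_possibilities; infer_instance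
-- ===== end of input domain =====

-- B replaces A's recursion on the remainder by a one-pass parse into option groups
-- followed by an iterative left-fold product (objective: alternative decomposition, same cost).

-- ===== PORT A =====
-- A's combine loop: 'for suffix in suffixes: possibilites += [choice + suffix for choice in choices]'
def pvCombine (choices : List Char) (suffixes : List (List Char)) : List (List Char) :=
  suffixes.foldl (fun acc suf => acc ++ choices.map (fun ch => ch :: suf)) []

-- recursive core of A over List Char; 'none' = the ValueError from s.index(')')
def pvA : List Char → Option (List (List Char))
  | [] => some [[]]
  | c :: rest =>
    if c = '(' then
      -- end = s.index(')'); remainder = s[end+1:]; choices = s[1:end]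
      match PySem.List.index? rest ')' with
      | none => none
      | some j => (pvA (rest.drop (j + 1))).map (fun suffixes => pvCombine (rest.take j) suffixes)
    else
      (pvA rest).map (fun suffixes => pvCombine [c] suffixes)
termination_by cs => cs.length
decreasing_by
  · simp
  · simp

def parenthetical_possibilities (s : String) : List String :=
  match pvA s.toList with
  | none => []          -- ValueError path, excluded by Pre_
  | some r => r.map String.ofList

-- ===== PORT B =====
-- one-pass parse of s into the list of option groups; 'none' = the ValueError from s.index(')', i)
def pvParse : List Char → Option (List (List Char))
  | [] => some []
  | c :: rest =>
    if c = '(' then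
      match PySem.List.index? rest ')' with
      | none => none
      | some j => (pvParse (rest.drop (j + 1))).map (fun gs => rest.take j :: gs)
    else
      (pvParse rest).map (fun gs => [c] :: gs)
termination_by cs => cs.length
decreasing_by
  · simp
  · simp

-- 'results = [p + c for c in g for p in results]'
def pvProdStep (res : List (List Char)) (g : List Char) : List (List Char) :=
  g.flatMap (fun c => res.map (fun p => p ++ [c]))

def parenthetical_possibilities_alt (s : String) : List String :=
  match pvParse s.toList with
  | none => []          -- ValueError path, excluded by Pre_
  | some groups => (groups.foldl pvProdStep [[]]).map String.ofList

-- ===== PRECONDITION & SPEC =====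
-- Pre_ excludes exactly the strings containing a '(' with no ')' after it, on which
-- both Python A and Python B raise ValueError (s.index(')') fails).
def Pre_parenthetical_possibilities (s : String) : Prop :=
  ∀ i < s.toList.length, s.toList.getD i ' ' = '(' → ')' ∈ s.toList.drop (i + 1)
instance (s : String) : Decidable (Pre_parenthetical_possibilities s) := by
  unfold Pre_parenthetical_possibilities; infer_instance

def pvWitness_parenthetical_possibilities : String := "a(bc)(de)f"

def Spec_parenthetical_possibilities (s : String) (out : List String) : Prop := out = parenthetical_possibilities_alt s
instance (s : String) (out : List String) : Decidable (Spec_parenthetical_possibilities s out) := by unfold Spec_parenthetical_possibilities; infer_instance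

-- ===== CLAIM (what is proved, stated in full; the proofs are below) =====
def Claim_equal_parenthetical_possibilities : Prop := ∀ (s : String), Dom_parenthetical_possibilities s → Pre_parenthetical_possibilities s → Spec_parenthetical_possibilities s (parenthetical_possibilities s)

-- ===== LEMMAS AND PROOFS =====

-- right-fold generator: the value A's recursion computes from the group list
def pvGenR (gs : List (List Char)) : List (List Char) :=
  gs.foldr (fun g r => r.flatMap (fun suf => g.map (fun c => c :: suf))) [[]]

theorem pvCombine_eq (g : List Char) (suffixes : List (List Char)) :
    pvCombine g suffixes = suffixes.flatMap (fun suf => g.map (fun c => c :: suf)) := by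
  unfold pvCombine
  rw [PySem.List.foldl_append_eq_flatMap]
  simp

-- B's left fold over the groups, generalized over the accumulator, equals the right-fold generator
theorem pvFoldl_genR (gs : List (List Char)) (acc : List (List Char)) :
    gs.foldl pvProdStep acc = (pvGenR gs).flatMap (fun suf => acc.map (fun p => p ++ suf)) := by
  induction gs generalizing acc with
  | nil => simp [pvGenR]
  | cons g gs ih =>
    simp only [List.foldl_cons, ih, pvGenR, List.foldr_cons]
    rw [List.flatMap_assoc]
    refine List.flatMap_congr ?_
    intro suf _
    simp [pvProdStep, List.flatMap_map, List.map_flatMap, List.map_map, Function.comp_def,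
      List.append_assoc]

-- unfolding lemmas for the two ports' recursions
theorem pvA_paren (rest : List Char) (j : Nat) (h : PySem.List.index? rest ')' = some j) :
    pvA ('(' :: rest) = (pvA (rest.drop (j + 1))).map (fun suffixes => pvCombine (rest.take j) suffixes) := by
  rw [pvA, h]; simp

theorem pvA_paren_none (rest : List Char) (h : PySem.List.index? rest ')' = none) :
    pvA ('(' :: rest) = none := by
  rw [pvA, h]; simp

theorem pvA_char (c : Char) (rest : List Char) (h : ¬ c = '(') :
    pvA (c :: rest) = (pvA rest).map (fun suffixes => pvCombine [c] suffixes) := by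
  rw [pvA, if_neg h]

theorem pvParse_paren (rest : List Char) (j : Nat) (h : PySem.List.index? rest ')' = some j) :
    pvParse ('(' :: rest) = (pvParse (rest.drop (j + 1))).map (fun gs => rest.take j :: gs) := by
  rw [pvParse, h]; simp

theorem pvParse_paren_none (rest : List Char) (h : PySem.List.index? rest ')' = none) :
    pvParse ('(' :: rest) = none := by
  rw [pvParse, h]; simp

theorem pvParse_char (c : Char) (rest : List Char) (h : ¬ c = '(') :
    pvParse (c :: rest) = (pvParse rest).map (fun gs => [c] :: gs) := by
  rw [pvParse, if_neg h]

-- A's recursion computes the right-fold generator of B's parse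
theorem pvA_eq_parse (cs : List Char) :
    pvA cs = (pvParse cs).map pvGenR := by
  induction cs using pvA.induct with
  | case1 => simp [pvA, pvParse, pvGenR]
  | case2 rest hidx => rw [pvA_paren_none rest hidx, pvParse_paren_none rest hidx]; simp
  | case3 rest j hidx ih =>
    rw [pvA_paren rest j hidx, pvParse_paren rest j hidx, ih, Option.map_map, Option.map_map]
    cases pvParse (rest.drop (j + 1)) <;> simp [pvCombine_eq, pvGenR]
  | case4 c rest h ih =>
    rw [pvA_char c rest h, pvParse_char c rest h, ih, Option.map_map, Option.map_map]
    cases pvParse rest <;> simp [pvCombine_eq, pvGenR]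

-- ===== VERDICT (by name: the statement is the Claim_ definition above) =====
theorem parenthetical_possibilities_spec : Claim_equal_parenthetical_possibilities := by
  intro s _ _
  unfold Spec_parenthetical_possibilities parenthetical_possibilities parenthetical_possibilities_alt
  rw [pvA_eq_parse]
  cases hp : pvParse s.toList with
  | none => simp
  | some gs => simp [pvFoldl_genR, pvGenR]
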